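-- pv_equiv track=rewrite | github.com/Bynax/NLP_HW | cw/evaluate.py | __correct_words
-- ===== SOURCE A (Python) =====
-- def __correct_words(reference_list, predict_list):
--     """
--     :param reference_list: 参考列表
--     :param predict_list: 预测列表
--     :return: 正确预测的数目
--     """
--     # 调用的时候 assert两个字符串长度相等
--     correct_num = 0
--     index_predict = 0
--     index_reference = 0
--     index_lreference = 0
--     index_lpredict = 0
--     len_lreference = len(reference_list)
--     len_lpredict = len(predict_list)
--     while index_lreference < len_lreference and index_lpredict < len_lpredict:
--         if predict_list[index_lpredict] == reference_list[index_lreference]:  # match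
--             correct_num += 1
--             index_predict += len(predict_list[index_lpredict])
--             index_reference += len(reference_list[index_lreference])
--             index_lpredict += 1
--             index_lreference += 1
--         else:
--             if index_predict == index_reference:
--                 index_predict += len(predict_list[index_lpredict])  # move
--                 index_reference += len(reference_list[index_lreference])
--                 index_lpredict += 1
--                 index_lreference += 1
--             elif index_predict < index_reference:
--                 index_predict += len(predict_list[index_lpredict])
--                 index_lpredict += 1
--             elif index_predict > index_reference:
--                 index_reference += len(reference_list[index_lreference])  # move
--                 index_lreference += 1
--     return correct_num
-- ===== SOURCE B (Python) =====
-- def __correct_words(reference_list, predict_list):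
--     """Stage 1: annotate each reference word with its absolute start offset and
--     stack them (top = first word). Stage 2: walk the predict words, each with its
--     own absolute offset, catching the reference stack up to the current offset."""
--     ref = []
--     off = 0
--     for w in reference_list:
--         ref.append((off, w))
--         off += len(w)
--     ref.reverse()  # use as a stack: ref[-1] is the next unconsumed reference word
--     count = 0
--     off = 0
--     for w in predict_list:
--         while ref:
--             r_off, r_w = ref[-1]
--             if w == r_w:
--                 count += 1
--                 ref.pop()
--                 break
--             if off <= r_off:
--                 if off == r_off:
--                     ref.pop()
--                 break
--             ref.pop()
--         off += len(w)
--     return count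
-- ===== Notes on version B (the rewrite author's own statement) =====
-- stated objective: alternative
-- what changed: Replaced A's single while-loop merge over four live counters (two list indices plus two accumulated character offsets) by a staged design: a first pass annotates every reference word with its absolute start offset and stacks them, then a for-loop over predict words with an inner catch-up loop consumes that stack, comparing precomputed absolute offsets instead of accumulating both sides in one loop.
import Mathlib
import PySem

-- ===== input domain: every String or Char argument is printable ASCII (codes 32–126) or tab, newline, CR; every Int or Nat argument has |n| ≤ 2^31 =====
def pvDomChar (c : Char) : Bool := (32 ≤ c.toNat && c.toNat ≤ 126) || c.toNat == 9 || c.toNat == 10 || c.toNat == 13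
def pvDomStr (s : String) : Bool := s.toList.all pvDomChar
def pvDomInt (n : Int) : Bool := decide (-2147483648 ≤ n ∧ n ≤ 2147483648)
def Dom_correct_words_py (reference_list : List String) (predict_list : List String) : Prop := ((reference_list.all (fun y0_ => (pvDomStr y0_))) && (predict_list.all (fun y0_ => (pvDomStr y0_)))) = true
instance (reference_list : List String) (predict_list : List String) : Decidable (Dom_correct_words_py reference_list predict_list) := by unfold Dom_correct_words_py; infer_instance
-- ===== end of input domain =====

-- B restructures A's one-loop four-counter merge into staged passes: a first pass
-- annotates reference words with absolute start offsets into a stack, then an outer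
-- loop over predict words with an inner catch-up loop consumes it (objective: alternative).


-- ===== PORT A =====
-- A's while loop: state (index_lreference, index_lpredict, index_reference, index_predict,
-- correct_num); each branch mirrors A's branches in order. List indexing is via pyGetD:
-- inside the loop guard both indices are in range, so the default is never read.
def correct_words_py_loop (reference_list : List String) (predict_list : List String)
    (ilr ilp : Nat) (ir ip c : Int) : Int :=
  if _h : ilr < reference_list.length ∧ ilp < predict_list.length then
    let rw := PySem.List.pyGetD reference_list (ilr : Int) ""
    let pw := PySem.List.pyGetD predict_list (ilp : Int) ""
    if pw = rw then
      correct_words_py_loop reference_list predict_list (ilr + 1) (ilp + 1)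
        (ir + PySem.Str.len rw) (ip + PySem.Str.len pw) (c + 1)
    else if ip = ir then
      correct_words_py_loop reference_list predict_list (ilr + 1) (ilp + 1)
        (ir + PySem.Str.len rw) (ip + PySem.Str.len pw) c
    else if ip < ir then
      correct_words_py_loop reference_list predict_list ilr (ilp + 1)
        ir (ip + PySem.Str.len pw) c
    else
      correct_words_py_loop reference_list predict_list (ilr + 1) ilp
        (ir + PySem.Str.len rw) ip c
  else c
termination_by (reference_list.length - ilr) + (predict_list.length - ilp)
decreasing_by all_goals omega

def correct_words_py (reference_list : List String) (predict_list : List String) : Int :=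
  correct_words_py_loop reference_list predict_list 0 0 0 0 0

-- ===== PORT B =====
-- B's stage 1: 'for w in reference_list: ref.append((off, w)); off += len(w)'.
def correct_words_py_alt_annot (reference_list : List String) : List (Int × String) × Int :=
  reference_list.foldl (fun st w => (st.1 ++ [(st.2, w)], st.2 + PySem.Str.len w)) ([], 0)

-- B's inner 'while ref:' body. Source B reverses the annotated list and pops from its END;
-- a Python list popped from its end is modelled as the Lean list of the same elements in
-- pop order consumed from the HEAD, so the stack here is the annotated list in original
-- order (reverse and end-popping cancel), heads being Source B's ref[-1].
def correct_words_py_alt_inner :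
    List (Int × String) → String → Int → Int → List (Int × String) × Int
  | [], _, _, count => ([], count)
  | (r_off, r_w) :: rest, w, off, count =>
    if w = r_w then (rest, count + 1)
    else if off ≤ r_off then (if off = r_off then rest else (r_off, r_w) :: rest, count)
    else correct_words_py_alt_inner rest w off count

-- B's outer 'for w in predict_list:' loop, state (stack, count, off).
def correct_words_py_alt_outer : List String → List (Int × String) → Int → Int → Int
  | [], _, count, _ => count
  | w :: ws, stk, count, off =>
    let st := correct_words_py_alt_inner stk w off count
    correct_words_py_alt_outer ws st.1 st.2 (off + PySem.Str.len w)

def correct_words_py_alt (reference_list : List String) (predict_list : List String) : Int :=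
  correct_words_py_alt_outer predict_list (correct_words_py_alt_annot reference_list).1 0 0

-- ===== PRECONDITION & SPEC =====
def Spec_correct_words_py (reference_list : List String) (predict_list : List String) (out : Int) : Prop := out = correct_words_py_alt reference_list predict_list
instance (reference_list : List String) (predict_list : List String) (out : Int) : Decidable (Spec_correct_words_py reference_list predict_list out) := by unfold Spec_correct_words_py; infer_instance

-- ===== CLAIM (what is proved, stated in full; the proofs are below) =====
def Claim_equal_correct_words_py : Prop := ∀ (reference_list : List String) (predict_list : List String), Dom_correct_words_py reference_list predict_list → Spec_correct_words_py reference_list predict_list (correct_words_py reference_list predict_list)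

-- ===== LEMMAS AND PROOFS =====

-- Direct recursive form of B's annotation pass.
def pvAnnot : Int → List String → List (Int × String)
  | _, [] => []
  | off, w :: ws => (off, w) :: pvAnnot (off + PySem.Str.len w) ws

-- Sum of the lengths of the first n words (A's index_reference after consuming n words).
def pvOffs : List String → Nat → Int
  | _, 0 => 0
  | [], _ + 1 => 0
  | w :: ws, n + 1 => PySem.Str.len w + pvOffs ws n

theorem pvAnnot_length (off : Int) (ws : List String) :
    (pvAnnot off ws).length = ws.length := by
  induction ws generalizing off with
  | nil => rfl
  | cons w ws ih => simp [pvAnnot, ih]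

theorem pvAnnot_drop (n : Nat) (off : Int) (ws : List String) :
    (pvAnnot off ws).drop n = pvAnnot (off + pvOffs ws n) (ws.drop n) := by
  induction n generalizing off ws with
  | zero => simp [pvOffs]
  | succ n ih =>
    cases ws with
    | nil => simp [pvAnnot, pvOffs]
    | cons w ws =>
      simp only [pvAnnot, pvOffs, List.drop_succ_cons, ih]
      congr 1
      ring

theorem pvOffs_succ (ws : List String) (n : Nat) (h : n < ws.length) :
    pvOffs ws (n + 1) = pvOffs ws n + PySem.Str.len ws[n] := by
  induction ws generalizing n with
  | nil => simp at h
  | cons w ws ih =>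
    cases n with
    | zero => simp [pvOffs]
    | succ n =>
      simp only [pvOffs, List.getElem_cons_succ, ih n (by simpa using h)]
      ring

theorem pvAnnot_fold (ws : List String) (acc : List (Int × String)) (off : Int) :
    ws.foldl (fun st w => (st.1 ++ [(st.2, w)], st.2 + PySem.Str.len w)) (acc, off) =
      (acc ++ pvAnnot off ws, off + pvOffs ws ws.length) := by
  induction ws generalizing acc off with
  | nil => simp [pvAnnot, pvOffs]
  | cons w ws ih =>
    simp only [List.foldl_cons, List.length_cons, pvAnnot, pvOffs]
    rw [ih]
    simp only [List.append_assoc, List.singleton_append, Prod.mk.injEq]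
    exact ⟨trivial, by ring⟩

theorem outer_nil_stack (ws : List String) (c off : Int) :
    correct_words_py_alt_outer ws [] c off = c := by
  induction ws generalizing off with
  | nil => rfl
  | cons w ws ih => simp [correct_words_py_alt_outer, correct_words_py_alt_inner, ih]

-- One step of B's outer loop (the let written out).
theorem outer_cons (w : String) (ws : List String) (stk : List (Int × String))
    (c off : Int) :
    correct_words_py_alt_outer (w :: ws) stk c off =
      correct_words_py_alt_outer ws (correct_words_py_alt_inner stk w off c).1
        (correct_words_py_alt_inner stk w off c).2 (off + PySem.Str.len w) := rfl

-- drop ilr of the annotated reference list, exposed as head :: tail when in range.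
theorem pvAnnot_drop_cons (ref : List String) (ilr : Nat) (h : ilr < ref.length) :
    (pvAnnot 0 ref).drop ilr =
      (pvOffs ref ilr, ref[ilr]) :: (pvAnnot 0 ref).drop (ilr + 1) := by
  rw [pvAnnot_drop, pvAnnot_drop, List.drop_eq_getElem_cons h, pvAnnot,
    pvOffs_succ ref ilr h]
  simp

-- Invariant: A's loop at (ilr, ilp, ir, ip, c) with ir equal to the total length of the
-- consumed reference prefix computes B's outer loop on the remaining predict words and
-- the remaining annotated reference stack.
theorem correct_words_py_loop_eq (reference_list predict_list : List String)
    (ilr ilp : Nat) (ir ip c : Int) :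
    ir = pvOffs reference_list ilr →
    correct_words_py_loop reference_list predict_list ilr ilp ir ip c =
      correct_words_py_alt_outer (predict_list.drop ilp)
        ((pvAnnot 0 reference_list).drop ilr) c ip := by
  fun_induction correct_words_py_loop reference_list predict_list ilr ilp ir ip c with
  | case1 ilr ilp ir ip c h rw pw heq ih =>
    intro hir
    have hrw : rw = reference_list[ilr] := by
      simp [rw, PySem.List.pyGetD_natCast, List.getD, List.getElem?_eq_getElem h.1]
    have hpw : pw = predict_list[ilp] := by
      simp [pw, PySem.List.pyGetD_natCast, List.getD, List.getElem?_eq_getElem h.2]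
    rw [ih (by rw [pvOffs_succ _ _ h.1, hir, hrw]),
      List.drop_eq_getElem_cons h.2, pvAnnot_drop_cons _ _ h.1, outer_cons]
    have hin : correct_words_py_alt_inner
        ((pvOffs reference_list ilr, reference_list[ilr]) ::
          (pvAnnot 0 reference_list).drop (ilr + 1)) predict_list[ilp] ip c =
        ((pvAnnot 0 reference_list).drop (ilr + 1), c + 1) := by
      simp [correct_words_py_alt_inner, ← hrw, ← hpw, heq]
    rw [hin, hpw]
  | case2 ilr ilp ir c h rw pw hne ih =>
    intro hir
    have hrw : rw = reference_list[ilr] := by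
      simp [rw, PySem.List.pyGetD_natCast, List.getD, List.getElem?_eq_getElem h.1]
    have hpw : pw = predict_list[ilp] := by
      simp [pw, PySem.List.pyGetD_natCast, List.getD, List.getElem?_eq_getElem h.2]
    rw [ih (by rw [pvOffs_succ _ _ h.1, hir, hrw]),
      List.drop_eq_getElem_cons h.2, pvAnnot_drop_cons _ _ h.1, outer_cons]
    have hin : correct_words_py_alt_inner
        ((pvOffs reference_list ilr, reference_list[ilr]) ::
          (pvAnnot 0 reference_list).drop (ilr + 1)) predict_list[ilp] ir c =
        ((pvAnnot 0 reference_list).drop (ilr + 1), c) := by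
      simp [correct_words_py_alt_inner, ← hrw, ← hpw, hne, ← hir]
    rw [hin, hpw]
  | case3 ilr ilp ir ip c h rw pw hne hne2 hlt ih =>
    intro hir
    have hrw : rw = reference_list[ilr] := by
      simp [rw, PySem.List.pyGetD_natCast, List.getD, List.getElem?_eq_getElem h.1]
    have hpw : pw = predict_list[ilp] := by
      simp [pw, PySem.List.pyGetD_natCast, List.getD, List.getElem?_eq_getElem h.2]
    rw [ih hir, List.drop_eq_getElem_cons h.2]
    conv_rhs => rw [pvAnnot_drop_cons _ _ h.1, outer_cons]
    have hin : correct_words_py_alt_inner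
        ((pvOffs reference_list ilr, reference_list[ilr]) ::
          (pvAnnot 0 reference_list).drop (ilr + 1)) predict_list[ilp] ip c =
        ((pvOffs reference_list ilr, reference_list[ilr]) ::
          (pvAnnot 0 reference_list).drop (ilr + 1), c) := by
      simp [correct_words_py_alt_inner, ← hrw, ← hpw, hne, ← hir,
        le_of_lt hlt, ne_of_lt hlt]
    rw [hin, hpw, ← pvAnnot_drop_cons _ _ h.1]
  | case4 ilr ilp ir ip c h rw pw hne hne2 hlt ih =>
    intro hir
    have hrw : rw = reference_list[ilr] := by
      simp [rw, PySem.List.pyGetD_natCast, List.getD, List.getElem?_eq_getElem h.1]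
    have hpw : pw = predict_list[ilp] := by
      simp [pw, PySem.List.pyGetD_natCast, List.getD, List.getElem?_eq_getElem h.2]
    rw [ih (by rw [pvOffs_succ _ _ h.1, hir, hrw]), List.drop_eq_getElem_cons h.2,
      outer_cons]
    conv_rhs => rw [pvAnnot_drop_cons _ _ h.1, outer_cons]
    have hin : correct_words_py_alt_inner
        ((pvOffs reference_list ilr, reference_list[ilr]) ::
          (pvAnnot 0 reference_list).drop (ilr + 1)) predict_list[ilp] ip c =
        correct_words_py_alt_inner ((pvAnnot 0 reference_list).drop (ilr + 1))
          predict_list[ilp] ip c := by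
      simp [correct_words_py_alt_inner, ← hrw, ← hpw, hne, not_le.mpr (by omega : pvOffs reference_list ilr < ip)]
    rw [hin]
  | case5 ilr ilp ir ip c h =>
    intro hir
    rcases Nat.lt_or_ge ilr reference_list.length with h1 | h1
    · have h2 : predict_list.length ≤ ilp := by omega
      rw [List.drop_eq_nil_of_le h2]
      rfl
    · have h2 : (pvAnnot 0 reference_list).length ≤ ilr := by
        rw [pvAnnot_length]; exact h1
      rw [List.drop_eq_nil_of_le h2, outer_nil_stack]

-- ===== VERDICT (by name: the statement is the Claim_ definition above) =====
theorem correct_words_py_spec : Claim_equal_correct_words_py := by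
  intro rl pl _
  unfold Spec_correct_words_py correct_words_py correct_words_py_alt
    correct_words_py_alt_annot
  rw [pvAnnot_fold, correct_words_py_loop_eq rl pl 0 0 0 0 0 (by simp [pvOffs])]
  simp
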